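-- pv_equiv track=rewrite | github.com/HarshitDawar55/Python_And_Automation | Next_Date.py | check_century
-- ===== SOURCE A (Python) =====
-- def check_century(n):
--     l = []
--     # l=[x for x in range(0,2)]
--     for i in range(0, 2):
--         r = n % 10
--         l.append(r)
--         n = n // 10
--     if l[0] == 0 and l[1] == 0:
--         return 1, n
--     else:
--         return -1, n
-- ===== SOURCE B (Python) =====
-- def check_century(n):
--     q = n // 100
--     return (1, q) if n % 100 == 0 else (-1, q)
-- ===== Notes on version B (the rewrite author's own statement) =====
-- stated objective: simpler
-- what changed: Replaces the two-iteration digit-extraction loop and list with one closed-form test (n % 100 == 0) and one division (n // 100).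
import Mathlib
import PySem

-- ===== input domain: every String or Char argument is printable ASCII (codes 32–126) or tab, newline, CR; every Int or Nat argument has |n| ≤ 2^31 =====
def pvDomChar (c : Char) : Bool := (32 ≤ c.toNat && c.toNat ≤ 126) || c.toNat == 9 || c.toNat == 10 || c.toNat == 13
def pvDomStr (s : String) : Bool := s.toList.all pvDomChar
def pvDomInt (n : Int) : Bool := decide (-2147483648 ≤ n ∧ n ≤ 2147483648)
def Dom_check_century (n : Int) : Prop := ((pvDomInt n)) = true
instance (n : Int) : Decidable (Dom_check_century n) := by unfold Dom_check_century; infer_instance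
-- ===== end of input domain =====

-- B replaces A's two-iteration digit loop with a closed-form n % 100 test and n // 100 (objective: simpler).


-- ===== PORT A =====
-- loop 'for i in range(0, 2)' over state (l, n); l[0] / l[1] via PySem.List.pyGet? (always in range here)
def check_century (n : Int) : Int × Int :=
  let st := (PySem.List.pyRange 0 2 1).foldl
    (fun (st : List Int × Int) _ =>
      let r := PySem.Int.mod st.2 10
      (st.1 ++ [r], PySem.Int.floordiv st.2 10)) ([], n)
  if PySem.List.pyGet? st.1 0 = some 0 ∧ PySem.List.pyGet? st.1 1 = some 0 then
    (1, st.2)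
  else
    (-1, st.2)

-- ===== PORT B =====
def check_century_alt (n : Int) : Int × Int :=
  let q := PySem.Int.floordiv n 100
  if PySem.Int.mod n 100 = 0 then (1, q) else (-1, q)

-- ===== PRECONDITION & SPEC =====
def Spec_check_century (n : Int) (out : Int × Int) : Prop := out = check_century_alt n
instance (n : Int) (out : Int × Int) : Decidable (Spec_check_century n out) := by unfold Spec_check_century; infer_instance

-- ===== CLAIM (what is proved, stated in full; the proofs are below) =====
def Claim_equal_check_century : Prop := ∀ (n : Int), Dom_check_century n → Spec_check_century n (check_century n)

-- ===== LEMMAS AND PROOFS =====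

-- ===== VERDICT (by name: the statement is the Claim_ definition above) =====
theorem check_century_spec : Claim_equal_check_century := by
  intro n _
  unfold Spec_check_century check_century check_century_alt
  simp only [show PySem.List.pyRange 0 2 1 = [0, 1] from by decide, List.foldl,
    PySem.List.pyGet?, PySem.List.pyIdx?,
    PySem.Int.mod_eq_emod_of_pos (by norm_num : (0:Int) < 10),
    PySem.Int.mod_eq_emod_of_pos (by norm_num : (0:Int) < 100),
    PySem.Int.floordiv_eq_ediv_of_pos (by norm_num : (0:Int) < 10),
    PySem.Int.floordiv_eq_ediv_of_pos (by norm_num : (0:Int) < 100)]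
  norm_num
  split_ifs <;> simp_all [Prod.ext_iff] <;> omega
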